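-- pv_equiv track=rewrite | github.com/pypi-data/pypi-mirror-396 | packages/alchemist-nrel/alchemist_nrel-0.3.1-py3-none-any.whl/alchemist_core/acquisition/skopt_acquisition.py | _get_categorical_combinations
-- ===== SOURCE A (Python) =====
-- def _get_categorical_combinations(categorical_dims):
--     """Get all combinations of categorical variables."""
--     import itertools
--
--     # If no categorical dimensions, return empty dict
--     if not categorical_dims:
--         return [{}]
--
--     # Get indices and categories
--     indices = list(categorical_dims.keys())
--     categories = [categorical_dims[idx] for idx in indices]
--
--     # Generate all combinations
--     combinations = []
--     for combo in itertools.product(*categories):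
--         combo_dict = {}
--         for i, idx in enumerate(indices):
--             combo_dict[idx] = combo[i]
--         combinations.append(combo_dict)
--
--     return combinations
-- ===== SOURCE B (Python) =====
-- def _get_categorical_combinations(categorical_dims):
--     """Get all combinations of categorical variables."""
--     result = [{}]
--     for idx, values in categorical_dims.items():
--         result = [{**partial, idx: value} for partial in result for value in values]
--     return result
-- ===== Notes on version B (the rewrite author's own statement) =====
-- stated objective: simpler
-- what changed: Replaces itertools.product over the value lists plus a per-combination dict-building loop by a single incremental fold that starts from a single empty partial dict and extends every partial dict with each value of the next dimension.
import Mathlib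
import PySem

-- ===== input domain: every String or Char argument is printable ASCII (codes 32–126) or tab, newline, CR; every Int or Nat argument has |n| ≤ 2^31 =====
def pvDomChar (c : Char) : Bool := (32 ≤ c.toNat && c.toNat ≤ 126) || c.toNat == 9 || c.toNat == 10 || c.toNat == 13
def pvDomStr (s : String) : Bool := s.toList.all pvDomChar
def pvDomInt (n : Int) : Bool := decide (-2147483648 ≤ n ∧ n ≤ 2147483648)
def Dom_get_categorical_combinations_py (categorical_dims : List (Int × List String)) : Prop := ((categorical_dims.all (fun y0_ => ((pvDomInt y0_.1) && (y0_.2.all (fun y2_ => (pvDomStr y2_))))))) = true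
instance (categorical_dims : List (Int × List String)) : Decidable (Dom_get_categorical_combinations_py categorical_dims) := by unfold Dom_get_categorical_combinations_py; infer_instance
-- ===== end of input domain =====

-- B replaces the itertools.product + per-combo dict-building loop of A by a single
-- incremental fold that extends each partial dict with every value of the next dimension
-- (objective: simpler, same asymptotic cost).

-- ===== PORT A =====
-- itertools.product(*categories), rightmost factor varying fastest
def pyProductA : List (List String) → List (List String)
  | [] => [[]]
  | c :: rest => c.flatMap (fun v => (pyProductA rest).map (fun t => v :: t))

def get_categorical_combinations_py (categorical_dims : List (Int × List String)) : List (List (Int × String)) :=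
  if categorical_dims = [] then [[]]
  else
    let indices := categorical_dims.map Prod.fst
    let categories := categorical_dims.map Prod.snd
    (pyProductA categories).map (fun combo =>
      ((indices.zip combo).foldl (fun d p => d.insert p.1 p.2)
        (PySem.Dict.empty : PySem.Dict Int String)).items)

-- ===== PORT B =====
def get_categorical_combinations_py_alt (categorical_dims : List (Int × List String)) : List (List (Int × String)) :=
  categorical_dims.foldl
    (fun result p => result.flatMap (fun partial_ => p.2.map (fun v => partial_ ++ [(p.1, v)])))
    [[]]

-- ===== PRECONDITION & SPEC =====
-- Pre_ requires the dimension keys to be pairwise distinct: the Python argument is a dict,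
-- whose keys are necessarily distinct, so duplicate-key association lists correspond to no
-- Python input at all.
def Pre_get_categorical_combinations_py (categorical_dims : List (Int × List String)) : Prop :=
  (categorical_dims.map Prod.fst).Nodup
instance (categorical_dims : List (Int × List String)) : Decidable (Pre_get_categorical_combinations_py categorical_dims) := by unfold Pre_get_categorical_combinations_py; infer_instance

def pvWitness_get_categorical_combinations_py : (List (Int × List String)) :=
  [(1, ["a", "b"]), (2, ["x"])]

def Spec_get_categorical_combinations_py (categorical_dims : List (Int × List String)) (out : List (List (Int × String))) : Prop := out = get_categorical_combinations_py_alt categorical_dims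
instance (categorical_dims : List (Int × List String)) (out : List (List (Int × String))) : Decidable (Spec_get_categorical_combinations_py categorical_dims out) := by unfold Spec_get_categorical_combinations_py; infer_instance

-- ===== CLAIM (what is proved, stated in full; the proofs are below) =====
def Claim_equal_get_categorical_combinations_py : Prop := ∀ (categorical_dims : List (Int × List String)), Dom_get_categorical_combinations_py categorical_dims → Pre_get_categorical_combinations_py categorical_dims → Spec_get_categorical_combinations_py categorical_dims (get_categorical_combinations_py categorical_dims)

-- ===== LEMMAS AND PROOFS =====

-- right-recursive reference form of the combination list
def combRef : List (Int × List String) → List (List (Int × String))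
  | [] => [[]]
  | (k, vs) :: rest => vs.flatMap (fun v => (combRef rest).map (fun t => (k, v) :: t))

lemma fst_zip_sublist {α β : Type} : ∀ (ks : List α) (vs : List β), ((ks.zip vs).map Prod.fst).Sublist ks
  | [], _ => by simp
  | _ :: _, [] => by simp
  | k :: ks, v :: vs => by simpa using (fst_zip_sublist ks vs).cons₂ k

-- A's inner dict-building loop over fresh distinct keys is just the zip list
lemma dict_loop_eq_zip (ks : List Int) (vs : List String) (h : ks.Nodup) :
    ((ks.zip vs).foldl (fun d p => d.insert p.1 p.2)
      (PySem.Dict.empty : PySem.Dict Int String)).items = ks.zip vs := by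
  have hk : ((ks.zip vs).map Prod.fst).Nodup := (fst_zip_sublist ks vs).nodup h
  have := PySem.Dict.items_foldl_insert_fresh (l := ks.zip vs)
    (k := Prod.fst) (v := Prod.snd) (d := (PySem.Dict.empty : PySem.Dict Int String))
    (by intro a _; exact PySem.Dict.contains_empty _) hk
  simpa using this

-- zipping the keys onto each product tuple gives the reference form
lemma prod_zip_eq_combRef (dims : List (Int × List String)) :
    (pyProductA (dims.map Prod.snd)).map (fun c => (dims.map Prod.fst).zip c) = combRef dims := by
  induction dims with
  | nil => simp [pyProductA, combRef]
  | cons p rest ih =>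
    obtain ⟨k, vs⟩ := p
    simp only [List.map_cons, pyProductA, combRef, List.map_flatMap, List.map_map]
    refine List.flatMap_congr ?_
    intro v _
    rw [← ih, List.map_map]
    rfl

-- B's fold, generalized over the accumulator
lemma alt_foldl_eq (dims : List (Int × List String)) :
    ∀ acc : List (List (Int × String)),
      dims.foldl
        (fun result p => result.flatMap (fun partial_ => p.2.map (fun v => partial_ ++ [(p.1, v)])))
        acc = acc.flatMap (fun q => (combRef dims).map (fun t => q ++ t)) := by
  induction dims with
  | nil => intro acc; simp [combRef]
  | cons p rest ih =>
    intro acc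
    obtain ⟨k, vs⟩ := p
    simp only [List.foldl_cons, ih, combRef, List.map_flatMap, List.flatMap_assoc,
      List.flatMap_map, List.map_map]
    refine List.flatMap_congr ?_
    intro q _
    simp [Function.comp_def, List.append_assoc]

lemma alt_eq_combRef (dims : List (Int × List String)) :
    get_categorical_combinations_py_alt dims = combRef dims := by
  simp [get_categorical_combinations_py_alt, alt_foldl_eq]

-- ===== VERDICT (by name: the statement is the Claim_ definition above) =====
theorem get_categorical_combinations_py_spec : Claim_equal_get_categorical_combinations_py := by
  intro dims _ hpre
  unfold Spec_get_categorical_combinations_py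
  rw [alt_eq_combRef]
  unfold get_categorical_combinations_py
  split
  · subst ‹dims = []›; rfl
  · rw [← prod_zip_eq_combRef]
    refine List.map_congr_left ?_
    intro c _
    exact dict_loop_eq_zip _ c hpre
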